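-- pv_equiv track=rewrite | github.com/pilyeooong/algorithm | greedy/law_of_big_numbers.py | solution
-- ===== SOURCE A (Python) =====
-- def solution(n, m, k, l):
--     sorted_l = sorted(l)
--
--     first_num = sorted_l[n - 1]
--     second_num = sorted_l[n - 2]
--
--     count = k
--
--     total = 0
--     for _ in range(m):
--         if count > 0:
--             total += first_num
--             count -= 1
--         else:
--             total += second_num
--             count = k
--
--     return total
-- ===== SOURCE B (Python) =====
-- def solution(n, m, k, l):
--     s = sorted(l)
--     first = s[n - 1]
--     second = s[n - 2]
--     mm = max(m, 0)
--     if k <= 0: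
--         return second * mm
--     q, r = divmod(mm, k + 1)
--     return first * (q * k + r) + second * q
-- ===== Notes on version B (the rewrite author's own statement) =====
-- stated objective: faster
-- what changed: Replaces the m-iteration greedy loop with closed-form arithmetic: the loop repeats a period of k firsts followed by one second, so divmod(m, k+1) gives the totals directly.
import Mathlib
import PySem

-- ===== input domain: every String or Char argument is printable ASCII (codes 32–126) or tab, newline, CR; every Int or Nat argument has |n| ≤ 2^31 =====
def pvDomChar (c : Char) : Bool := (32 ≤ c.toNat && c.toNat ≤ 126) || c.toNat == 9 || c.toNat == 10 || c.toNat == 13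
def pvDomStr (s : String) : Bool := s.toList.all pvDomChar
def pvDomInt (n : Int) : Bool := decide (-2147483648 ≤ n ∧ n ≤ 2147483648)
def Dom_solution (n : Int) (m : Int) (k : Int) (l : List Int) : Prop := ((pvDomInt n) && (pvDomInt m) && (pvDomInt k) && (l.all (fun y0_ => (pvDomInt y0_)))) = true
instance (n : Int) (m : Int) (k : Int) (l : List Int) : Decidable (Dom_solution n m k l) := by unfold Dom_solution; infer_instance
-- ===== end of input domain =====

-- B replaces A's m-iteration greedy loop by closed-form divmod arithmetic over the (k firsts, one second) period: faster (asymptotic in m).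


-- ===== PORT A =====
-- literal port of A: sort, index n-1 and n-2 (IndexError = none, excluded by Pre_), then the m-step counting loop
def solution (n : Int) (m : Int) (k : Int) (l : List Int) : Int :=
  let sorted_l := PySem.List.sorted l (fun x => x) false
  match PySem.List.pyGet? sorted_l (n - 1), PySem.List.pyGet? sorted_l (n - 2) with
  | some first_num, some second_num =>
      (PySem.List.pyRange 0 m 1).foldl
        (fun (st : Int × Int) _ =>
          if st.1 > 0 then (st.1 - 1, st.2 + first_num)
          else (k, st.2 + second_num)) (k, 0) |>.2
  | _, _ => 0  -- unreachable under Pre_ (Python raises IndexError)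

-- ===== PORT B =====
def solution_alt (n : Int) (m : Int) (k : Int) (l : List Int) : Int :=
  let s := PySem.List.sorted l (fun x => x) false
  match PySem.List.pyGet? s (n - 1) with
  | none => 0  -- unreachable under Pre_ (Python raises IndexError)
  | some first =>
    match PySem.List.pyGet? s (n - 2) with
    | none => 0  -- unreachable under Pre_ (Python raises IndexError)
    | some second =>
      let mm := max m 0
      if k ≤ 0 then second * mm
      else
        let q := PySem.Int.floordiv mm (k + 1)
        let r := PySem.Int.mod mm (k + 1)
        first * (q * k + r) + second * q

-- ===== PRECONDITION & SPEC =====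
-- Pre_ excludes exactly the inputs where both Pythons raise IndexError: n-1 or n-2 out of Python index range of l
def Pre_solution (n : Int) (m : Int) (k : Int) (l : List Int) : Prop :=
  PySem.Raise.InRange l.length (n - 1) ∧ PySem.Raise.InRange l.length (n - 2)
instance (n : Int) (m : Int) (k : Int) (l : List Int) : Decidable (Pre_solution n m k l) := by unfold Pre_solution; infer_instance
def pvWitness_solution : Int × Int × Int × List Int := (3, 7, 2, [1, 3, 2])
def Spec_solution (n : Int) (m : Int) (k : Int) (l : List Int) (out : Int) : Prop := out = solution_alt n m k l
instance (n : Int) (m : Int) (k : Int) (l : List Int) (out : Int) : Decidable (Spec_solution n m k l out) := by unfold Spec_solution; infer_instance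

-- ===== CLAIM (what is proved, stated in full; the proofs are below) =====
def Claim_equal_solution : Prop := ∀ (n : Int) (m : Int) (k : Int) (l : List Int), Dom_solution n m k l → Pre_solution n m k l → Spec_solution n m k l (solution n m k l)

-- ===== LEMMAS AND PROOFS =====

-- a fold whose body ignores the list element is an iterate of the step on the state
theorem foldl_ignore {α σ : Type} (g : σ → σ) (xs : List α) (s : σ) :
    xs.foldl (fun s _ => g s) s = g^[xs.length] s := by
  induction xs generalizing s with
  | nil => rfl
  | cons x t ih => simp [List.foldl_cons, ih, Function.iterate_succ_apply]

-- r consecutive first-branch steps while the counter stays positive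
theorem iter_first (fst snd k : Int) (r : Nat) :
    ∀ (c t : Int), (r : Int) ≤ c →
      (fun (st : Int × Int) => if st.1 > 0 then (st.1 - 1, st.2 + fst) else (k, st.2 + snd))^[r] (c, t)
        = (c - r, t + fst * r) := by
  induction r with
  | zero => intro c t _; simp
  | succ r ih =>
      intro c t h
      have hc : c > 0 := by push_cast at h; omega
      rw [Function.iterate_succ_apply]
      rw [if_pos hc, ih (c - 1) (t + fst) (by push_cast at h ⊢; omega)]
      simp only [Prod.mk.injEq]
      constructor <;> push_cast <;> ring

-- one full period of K+1 steps starting with counter k = K : adds fst*K + snd, resets counter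
theorem iter_period (fst snd : Int) (K : Nat) (q : Nat) :
    ∀ (t : Int),
      (fun (st : Int × Int) => if st.1 > 0 then (st.1 - 1, st.2 + fst) else (K, st.2 + snd))^[q * (K + 1)] ((K : Int), t)
        = ((K : Int), t + (fst * K + snd) * q) := by
  induction q with
  | zero => intro t; simp
  | succ q ih =>
      intro t
      have hsplit : (q + 1) * (K + 1) = (K + 1) + q * (K + 1) := by ring
      have hstep : ∀ s : Int, (fun (st : Int × Int) => if st.1 > 0 then (st.1 - 1, st.2 + fst) else ((K : Int), st.2 + snd))^[K + 1] ((K : Int), s)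
          = ((K : Int), s + (fst * K + snd)) := by
        intro s
        rw [Function.iterate_succ_apply']
        rw [iter_first fst snd K K (K : Int) s le_rfl]
        simp
        ring
      rw [hsplit, Function.iterate_add_apply, ih t, hstep]
      simp only [Prod.mk.injEq, true_and]
      push_cast
      ring

-- when k ≤ 0 every step takes the second branch
theorem iter_nonpos (fst snd k : Int) (hk : k ≤ 0) (N : Nat) :
    ∀ (t : Int),
      (fun (st : Int × Int) => if st.1 > 0 then (st.1 - 1, st.2 + fst) else (k, st.2 + snd))^[N] (k, t)
        = (k, t + snd * N) := by
  induction N with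
  | zero => intro t; simp
  | succ N ih =>
      intro t
      rw [Function.iterate_succ_apply]
      rw [if_neg (by omega)]
      rw [ih (t + snd)]
      simp only [Prod.mk.injEq, true_and]
      push_cast; ring

-- the core identity: loop value = closed form, for any first/second
theorem loop_eq_closed (fst snd m k : Int) :
    ((PySem.List.pyRange 0 m 1).foldl
        (fun (st : Int × Int) _ =>
          if st.1 > 0 then (st.1 - 1, st.2 + fst) else (k, st.2 + snd)) (k, 0)).2
      = (if k ≤ 0 then snd * (max m 0)
         else fst * (PySem.Int.floordiv (max m 0) (k + 1) * k + PySem.Int.mod (max m 0) (k + 1))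
              + snd * PySem.Int.floordiv (max m 0) (k + 1)) := by
  rw [foldl_ignore]
  have hlen : (PySem.List.pyRange 0 m 1).length = m.toNat := by
    rw [PySem.List.length_pyRange_one]; omega
  rw [hlen]
  set N := m.toNat with hN
  have hmax : max m 0 = (N : Int) := by omega
  by_cases hk : k ≤ 0
  · rw [iter_nonpos fst snd k hk N 0, if_pos hk, hmax]
    ring
  · -- k ≥ 1; write k = K, N = q*(K+1) + r
    rw [if_neg hk]
    have hk' : 0 < k := by omega
    set K := k.toNat with hK
    have hkK : k = (K : Int) := by omega
    have hcast : ((K : Int) + 1) = ((K + 1 : Nat) : Int) := by push_cast; ring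
    have hq : PySem.Int.floordiv (max m 0) (k + 1) = ((N / (K + 1) : Nat) : Int) := by
      rw [hmax, hkK, hcast]
      exact PySem.Int.floordiv_natCast N (K + 1)
    have hr : PySem.Int.mod (max m 0) (k + 1) = ((N % (K + 1) : Nat) : Int) := by
      rw [hmax, hkK, hcast]
      exact PySem.Int.mod_natCast N (K + 1)
    set q := N / (K + 1) with hqd
    set r := N % (K + 1) with hrd
    have hNqr : N = r + q * (K + 1) := by
      rw [hqd, hrd, Nat.mul_comm]
      exact (Nat.mod_add_div N (K + 1)).symm
    have hrK : r ≤ K := by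
      rw [hrd]
      have := Nat.mod_lt N (y := K + 1) (Nat.succ_pos K)
      omega
    have hkper :
        (fun (st : Int × Int) => if st.1 > 0 then (st.1 - 1, st.2 + fst) else (k, st.2 + snd))^[q * (K + 1)] (k, 0)
          = (k, 0 + (fst * K + snd) * q) := by
      rw [hkK]; exact iter_period fst snd K q 0
    have hrle : (r : Int) ≤ k := by rw [hkK]; exact_mod_cast hrK
    rw [hq, hr, hNqr, Function.iterate_add_apply, hkper,
        iter_first fst snd k r k (0 + (fst * K + snd) * q) hrle]
    show 0 + (fst * (K : Int) + snd) * q + fst * r = fst * ((q : Nat) * k + (r : Nat)) + snd * q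
    rw [hkK]
    ring

-- ===== VERDICT (by name: the statement is the Claim_ definition above) =====
theorem solution_spec : Claim_equal_solution := by
  intro n m k l _ hpre
  unfold Spec_solution solution solution_alt
  obtain ⟨h1, h2⟩ := hpre
  have hlen : (PySem.List.sorted l (fun x => x) false).length = l.length :=
    PySem.List.length_sorted l _ _
  obtain ⟨a, ha⟩ : ∃ a, PySem.List.pyGet? (PySem.List.sorted l (fun x => x) false) (n - 1) = some a := by
    cases hget : PySem.List.pyGet? (PySem.List.sorted l (fun x => x) false) (n - 1) with
    | some a => exact ⟨a, rfl⟩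
    | none =>
        exact absurd h1 (by rw [← hlen]; exact (PySem.List.pyGet?_eq_none_iff _ _).mp hget)
  obtain ⟨b, hb⟩ : ∃ b, PySem.List.pyGet? (PySem.List.sorted l (fun x => x) false) (n - 2) = some b := by
    cases hget : PySem.List.pyGet? (PySem.List.sorted l (fun x => x) false) (n - 2) with
    | some b => exact ⟨b, rfl⟩
    | none =>
        exact absurd h2 (by rw [← hlen]; exact (PySem.List.pyGet?_eq_none_iff _ _).mp hget)
  simp only [ha, hb]
  rw [loop_eq_closed a b m k]
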